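-- pv_equiv track=rewrite | github.com/ritaranx/AceSearcher | inference/main_qa.py | zigzag_visit
-- ===== SOURCE A (Python) =====
-- from typing import List, Dict
--
-- def zigzag_visit(lst: List) -> List:
--     """
--     Reorders the input list in a zigzag fashion.
--     Example:
--         Input: [1, 2, 3, 4, 5, 6, 7]
--         Output: [1, 3, 5, 7, 6, 4, 2]
--     """
--     n = len(lst)
--     result = [None] * n
--
--     # Fill first half (odd indices)
--     i, j = 0, 0
--     while j < (n + 1) // 2:
--         result[j] = lst[i]
--         i += 2
--         j += 1
--
--     # Fill second half (even indices)
--     i = 1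
--     j = n - 1
--     while j >= (n + 1) // 2:
--         result[j] = lst[i]
--         i += 2
--         j -= 1
--
--     return result
-- ===== SOURCE B (Python) =====
-- def zigzag_visit(lst):
--     """Zigzag reorder: even-index elements, then odd-index elements reversed."""
--     return lst[0::2] + lst[1::2][::-1]
-- ===== Notes on version B (the rewrite author's own statement) =====
-- stated objective: simpler
-- what changed: The preallocated result array and the two index-threading while loops are replaced by two stride-2 slices, one reversal and a concatenation (bulk C-level list operations).
import Mathlib
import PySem

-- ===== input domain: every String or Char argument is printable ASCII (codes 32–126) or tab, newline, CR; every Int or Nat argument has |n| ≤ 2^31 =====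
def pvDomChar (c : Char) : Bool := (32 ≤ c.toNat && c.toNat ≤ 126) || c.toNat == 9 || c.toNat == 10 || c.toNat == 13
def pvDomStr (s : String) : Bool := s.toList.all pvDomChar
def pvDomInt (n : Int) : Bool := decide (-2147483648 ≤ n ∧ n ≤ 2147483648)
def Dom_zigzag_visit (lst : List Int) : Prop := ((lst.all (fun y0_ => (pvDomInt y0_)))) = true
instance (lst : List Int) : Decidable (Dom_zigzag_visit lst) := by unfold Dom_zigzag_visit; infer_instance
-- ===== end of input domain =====

-- B replaces A's preallocated result array and two index-threading while loops by two
-- stride-2 slices, a reversal and a concatenation (objective: simpler).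

-- ===== PORT A =====
-- first while loop: while j < half: result[j] = lst[i]; i += 2; j += 1
-- result slots are Option Int ([None]*n); the write stores pyGet? lst i (always some: indices stay in range, proved below)
def zzLoop1 (lst : List Int) (res : List (Option Int)) (i j half : Int) : List (Option Int) :=
  if j < half then
    zzLoop1 lst (res.set j.toNat (PySem.List.pyGet? lst i)) (i + 2) (j + 1) half
  else res
termination_by (half - j).toNat
decreasing_by omega

-- second while loop: while j >= half: result[j] = lst[i]; i += 2; j -= 1
def zzLoop2 (lst : List Int) (res : List (Option Int)) (i j half : Int) : List (Option Int) :=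
  if half ≤ j then
    zzLoop2 lst (res.set j.toNat (PySem.List.pyGet? lst i)) (i + 2) (j - 1) half
  else res
termination_by (j - half + 1).toNat
decreasing_by omega

def zigzag_visit (lst : List Int) : List Int :=
  let n : Int := lst.length
  let result : List (Option Int) := List.replicate n.toNat none   -- [None] * n
  let half : Int := PySem.Int.floordiv (n + 1) 2                  -- (n + 1) // 2
  let r1 := zzLoop1 lst result 0 0 half
  let r2 := zzLoop2 lst r1 1 (n - 1) half
  -- return result: every slot has been written (proved below), so unwrap the Options
  r2.map (fun o => o.getD 0)

-- ===== PORT B =====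
-- return lst[0::2] + lst[1::2][::-1]   (step slices never yield None: step ≠ 0)
def zigzag_visit_alt (lst : List Int) : List Int :=
  ((PySem.List.slice? lst (some 0) none 2).getD [])
    ++ ((PySem.List.slice? ((PySem.List.slice? lst (some 1) none 2).getD []) none none (-1)).getD [])

-- ===== PRECONDITION & SPEC =====
def Spec_zigzag_visit (lst : List Int) (out : List Int) : Prop := out = zigzag_visit_alt lst
instance (lst : List Int) (out : List Int) : Decidable (Spec_zigzag_visit lst out) := by unfold Spec_zigzag_visit; infer_instance

-- ===== CLAIM (what is proved, stated in full; the proofs are below) =====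
def Claim_equal_zigzag_visit : Prop := ∀ (lst : List Int), Dom_zigzag_visit lst → Spec_zigzag_visit lst (zigzag_visit lst)

-- ===== LEMMAS AND PROOFS =====

-- canonical form both sides are reduced to: even-index elements ++ reversed odd-index elements
def zzCanon (lst : List Int) : List Int :=
  ((List.range ((lst.length + 1) / 2)).map (fun k => lst.getD (2 * k) 0))
    ++ (((List.range (lst.length / 2)).map (fun k => lst.getD (2 * k + 1) 0)).reverse)

theorem zzLoop1_getElem? (lst : List Int) (res : List (Option Int)) (i j half : Int)
    (hj : 0 ≤ j) (hh : half ≤ (res.length : Int)) (p : Nat) :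
    (zzLoop1 lst res i j half)[p]? =
      if j ≤ (p : Int) ∧ (p : Int) < half then some (PySem.List.pyGet? lst (i + 2 * ((p : Int) - j)))
      else res[p]? := by
  have key : ∀ fuel (res : List (Option Int)) (i j : Int), (half - j).toNat ≤ fuel → 0 ≤ j →
      half ≤ (res.length : Int) → ∀ p : Nat,
      (zzLoop1 lst res i j half)[p]? =
        if j ≤ (p : Int) ∧ (p : Int) < half then some (PySem.List.pyGet? lst (i + 2 * ((p : Int) - j)))
        else res[p]? := by
    intro fuel
    induction fuel with
    | zero =>
      intro res i j hf hj hh p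
      rw [zzLoop1, if_neg (by omega)]
      split_ifs with h1
      · omega
      · rfl
    | succ fuel ih =>
      intro res i j hf hj hh p
      rw [zzLoop1]
      by_cases h : j < half
      · rw [if_pos h, ih _ _ _ (by omega) (by omega) (by simpa using hh),
          List.getElem?_set]
        split_ifs with h1 h2 h3 <;> first | rfl | omega | (congr 2; omega)
      · rw [if_neg h]
        split_ifs with h1
        · omega
        · rfl
  exact key _ res i j le_rfl hj hh p

theorem zzLoop2_getElem? (lst : List Int) (res : List (Option Int)) (i j half : Int)
    (hh : 0 ≤ half) (hj : j < (res.length : Int)) (p : Nat) :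
    (zzLoop2 lst res i j half)[p]? =
      if half ≤ (p : Int) ∧ (p : Int) ≤ j then some (PySem.List.pyGet? lst (i + 2 * (j - (p : Int))))
      else res[p]? := by
  have key : ∀ fuel (res : List (Option Int)) (i j : Int), (j - half + 1).toNat ≤ fuel →
      j < (res.length : Int) → ∀ p : Nat,
      (zzLoop2 lst res i j half)[p]? =
        if half ≤ (p : Int) ∧ (p : Int) ≤ j then some (PySem.List.pyGet? lst (i + 2 * (j - (p : Int))))
        else res[p]? := by
    intro fuel
    induction fuel with
    | zero =>
      intro res i j hf hj p
      rw [zzLoop2, if_neg (by omega)]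
      split_ifs with h1
      · omega
      · rfl
    | succ fuel ih =>
      intro res i j hf hj p
      rw [zzLoop2]
      by_cases h : half ≤ j
      · rw [if_pos h, ih _ _ _ (by omega) (by simp only [List.length_set]; omega),
          List.getElem?_set]
        split_ifs with h1 h2 h3 <;> first | rfl | omega | (congr 2; omega)
      · rw [if_neg h]
        split_ifs with h1
        · omega
        · rfl
  exact key _ res i j le_rfl hj p

theorem zzLoop1_length (lst : List Int) (res : List (Option Int)) (i j half : Int) :
    (zzLoop1 lst res i j half).length = res.length := by
  have key : ∀ fuel (res : List (Option Int)) (i j : Int), (half - j).toNat ≤ fuel →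
      (zzLoop1 lst res i j half).length = res.length := by
    intro fuel
    induction fuel with
    | zero => intro res i j hf; rw [zzLoop1, if_neg (by omega)]
    | succ fuel ih =>
      intro res i j hf
      rw [zzLoop1]
      by_cases h : j < half
      · rw [if_pos h, ih _ _ _ (by omega)]; simp
      · rw [if_neg h]
  exact key _ res i j le_rfl

theorem filterMap_range_eq_map {α : Type} (c : Nat) (g : Nat → Option α) (f : Nat → α)
    (h : ∀ k < c, g k = some (f k)) :
    (List.range c).filterMap g = (List.range c).map f := by
  induction c with
  | zero => simp
  | succ c ih =>
    rw [List.range_succ, List.filterMap_append, List.map_append,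
      ih (fun k hk => h k (by omega))]
    simp [h c (by omega)]

theorem slice_even (lst : List Int) :
    (PySem.List.slice? lst (some 0) none 2).getD [] =
      (List.range ((lst.length + 1) / 2)).map (fun k => lst.getD (2 * k) 0) := by
  rw [PySem.List.slice?]
  simp only [PySem.List.sliceIndices]
  norm_num
  rw [show (if 0 < lst.length then (((lst.length : Int) + 2 - 1) / 2).toNat else 0) = (lst.length + 1) / 2 by split_ifs <;> omega]
  apply filterMap_range_eq_map
  intro k hk
  have h2 : 2 * k < lst.length := by omega
  rw [show (2 * (k : Int)).toNat = 2 * k by omega]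
  rw [List.getElem?_eq_getElem h2]
  simp

theorem slice_odd (lst : List Int) :
    (PySem.List.slice? lst (some 1) none 2).getD [] =
      (List.range (lst.length / 2)).map (fun k => lst.getD (2 * k + 1) 0) := by
  rw [PySem.List.slice?]
  simp only [PySem.List.sliceIndices]
  norm_num
  by_cases hn : lst.length = 0
  · simp [hn]
  · rw [show min 1 (lst.length : Int) = 1 by omega,
      show (if 1 < lst.length then (((lst.length : Int) - 1 + 2 - 1) / 2).toNat else 0) = lst.length / 2 by split_ifs <;> omega]
    apply filterMap_range_eq_map
    intro k hk
    have h2 : 2 * k + 1 < lst.length := by omega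
    rw [show ((1 : Int) + 2 * (k : Int)).toNat = 2 * k + 1 by omega]
    rw [List.getElem?_eq_getElem h2]
    simp

theorem alt_eq_canon (lst : List Int) : zigzag_visit_alt lst = zzCanon lst := by
  unfold zigzag_visit_alt zzCanon
  rw [slice_odd, PySem.List.slice?_none_none_neg_one, Option.getD_some, slice_even]

theorem zigzag_eq_canon (lst : List Int) : zigzag_visit lst = zzCanon lst := by
  unfold zigzag_visit zzCanon
  have hhalf : PySem.Int.floordiv ((lst.length : Int) + 1) 2 = (((lst.length + 1) / 2 : Nat) : Int) := by
    rw [PySem.Int.floordiv, Int.fdiv_eq_ediv]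
    norm_num
  simp only [hhalf, Int.toNat_natCast]
  apply List.ext_getElem?
  intro p
  rw [List.getElem?_map]
  rw [zzLoop2_getElem? lst _ 1 _ _ (by omega)
      (by rw [zzLoop1_length]; simp only [List.length_replicate]; omega)]
  rw [zzLoop1_getElem? lst _ 0 0 _ (by omega) (by simp only [List.length_replicate]; omega)]
  rw [List.getElem?_replicate, List.getElem?_append]
  simp only [List.length_map, List.length_range]
  by_cases hp1 : p < (lst.length + 1) / 2
  · rw [if_neg (by push_cast; omega), if_pos (by push_cast; omega), if_pos hp1]
    have h2 : 2 * p < lst.length := by omega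
    rw [show ((0 : Int) + 2 * ((p : Int) - 0)) = ((2 * p : Nat) : Int) by push_cast; ring,
      PySem.List.pyGet?_natCast, List.getElem?_eq_getElem h2,
      List.getElem?_map, List.getElem?_range hp1]
    simp [List.getD_eq_getElem?_getD, List.getElem?_eq_getElem h2]
  · by_cases hp2 : p < lst.length
    · rw [if_pos (by push_cast; omega), if_neg hp1]
      have hrl : p - (lst.length + 1) / 2 < (((List.range (lst.length / 2)).map (fun k => lst.getD (2 * k + 1) 0)).length) := by
        simp only [List.length_map, List.length_range]; omega
      rw [List.getElem?_reverse hrl]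
      simp only [List.length_map, List.length_range]
      have hidx : lst.length / 2 - 1 - (p - (lst.length + 1) / 2) < lst.length / 2 := by omega
      rw [List.getElem?_map, List.getElem?_range hidx]
      have h2 : 2 * (lst.length / 2 - 1 - (p - (lst.length + 1) / 2)) + 1 < lst.length := by omega
      rw [show ((1 : Int) + 2 * (((lst.length : Int) - 1) - (p : Int))) =
          ((2 * (lst.length / 2 - 1 - (p - (lst.length + 1) / 2)) + 1 : Nat) : Int) by push_cast; omega,
        PySem.List.pyGet?_natCast, List.getElem?_eq_getElem h2]
      simp [List.getD_eq_getElem?_getD, List.getElem?_eq_getElem h2]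
    · rw [if_neg (by push_cast; omega), if_neg (by push_cast; omega), if_neg hp2, if_neg hp1]
      rw [List.getElem?_eq_none (by simp only [List.length_reverse, List.length_map, List.length_range]; omega)]
      rfl

-- ===== VERDICT (by name: the statement is the Claim_ definition above) =====
theorem zigzag_visit_spec : Claim_equal_zigzag_visit := by
  intro lst _
  show zigzag_visit lst = zigzag_visit_alt lst
  rw [zigzag_eq_canon, alt_eq_canon]
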